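-- pv_equiv track=rewrite | github.com/seonho12-54/jungle | problem-solving/5주차/멀티스케쥴링.py | plug
-- ===== SOURCE A (Python) =====
-- def plug(lst, a, b):
--     count = 0
--     lsta = []
--     for i in range(b):
--         now = lst[i]
--         #지금 기기확인
--         if now in lsta:
--             continue
--
--         if len(lsta) < a:
--             lsta.append(now)
--             continue
--         #기기가 꽉 찼을 때
--
--         remove = -1#뺼기기
--         idx = -1#가장 나중에 쓰이는 위치
--
--         for k in lsta:
--
--             found = False
--
--
--             for j in range(i+1,b):
--                 if lst[j] == k:
--                     found = True
--                     if j > idx: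
--                         idx = j
--                         remove = k
--                     break
--
--
--             if found == False:
--                 remove = k
--                 break
--
--
--         lsta.remove(remove)
--         lsta.append(now)
--         count += 1
--
--
--
--     return count
-- ===== SOURCE B (Python) =====
-- def plug(lst, a, b):
--     # One pass to precompute each position's next occurrence, then per miss
--     # scan only the cache (value -> next-use index) to pick the evictee.
--     n = b if b > 0 else 0
--     INF = n  # past every index within the scanned prefix
--     nxt = [INF] * n
--     last = {}
--     for i in range(n - 1, -1, -1):
--         v = lst[i]
--         nxt[i] = last.get(v, INF)
--         last[v] = i
--     count = 0
--     cache = {}  # value -> index of its next use (INF = never again)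
--     for i in range(n):
--         v = lst[i]
--         if v in cache:
--             cache[v] = nxt[i]
--             continue
--         if len(cache) < a:
--             cache[v] = nxt[i]
--             continue
--         evict = None
--         best = -1
--         for k, nx in cache.items():
--             if nx >= INF:
--                 evict = k
--                 break
--             if nx > best:
--                 best = nx
--                 evict = k
--         del cache[evict]
--         cache[v] = nxt[i]
--         count += 1
--     return count
-- ===== Notes on version B (the rewrite author's own statement) =====
-- stated objective: faster
-- what changed: B precomputes each position's next-occurrence index in one backward pass and keeps the cache as a dict value->next-use, so each miss scans only the cache instead of rescanning the remaining access list once per cached item.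
import Mathlib
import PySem

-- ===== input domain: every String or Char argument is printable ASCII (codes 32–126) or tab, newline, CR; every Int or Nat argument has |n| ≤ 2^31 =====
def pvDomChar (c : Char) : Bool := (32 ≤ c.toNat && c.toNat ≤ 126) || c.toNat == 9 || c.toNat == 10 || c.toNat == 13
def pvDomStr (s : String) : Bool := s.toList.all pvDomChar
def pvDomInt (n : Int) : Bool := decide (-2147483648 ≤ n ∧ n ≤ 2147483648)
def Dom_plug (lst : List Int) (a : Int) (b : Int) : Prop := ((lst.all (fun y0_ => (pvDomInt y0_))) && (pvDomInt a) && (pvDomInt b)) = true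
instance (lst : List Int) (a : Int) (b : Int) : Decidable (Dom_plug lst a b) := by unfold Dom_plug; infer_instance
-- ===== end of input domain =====

-- B replaces A's per-miss rescan of the tail for every cached item by a one-pass
-- next-occurrence precomputation plus a cache of (value -> next-use index), so each
-- miss only scans the cache (objective: faster, asymptotic).

-- ===== PORT A =====
-- inner 'for j in range(i+1, b): if lst[j] == k: … break' — first index holding k
def plugFound (lst : List Int) (k : Int) : List Int → Option Int
  | [] => none
  | j :: rest => if PySem.List.pyGetD lst j 0 = k then some j else plugFound lst k rest

-- 'for k in lsta' with break, carrying (idx, remove)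
def plugScan (lst : List Int) (i b : Int) : List Int → Int → Int → Int
  | [], _, remove => remove
  | k :: rest, idx, remove =>
    match plugFound lst k (PySem.List.pyRange (i + 1) b 1) with
    | some j => if j > idx then plugScan lst i b rest j k else plugScan lst i b rest idx remove
    | none => k

def plugLoop (lst : List Int) (a b : Int) : List Int → Int × List Int → Int × List Int
  | [], st => st
  | i :: rest, (count, lsta) =>
    let now := PySem.List.pyGetD lst i 0
    if now ∈ lsta then
      plugLoop lst a b rest (count, lsta)
    else if (lsta.length : Int) < a then
      plugLoop lst a b rest (count, lsta ++ [now])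
    else
      let remove := plugScan lst i b lsta (-1) (-1)
      plugLoop lst a b rest (count + 1, ((PySem.List.remove? lsta remove).getD lsta) ++ [now])

def plug (lst : List Int) (a : Int) (b : Int) : Int :=
  (plugLoop lst a b (PySem.List.pyRange 0 b 1) (0, [])).1

-- ===== PORT B =====
-- 'for i in range(n-1, -1, -1): nxt[i] = last.get(v, INF); last[v] = i'
def plugAltNxt (lst : List Int) (INF : Int) :
    List Int → List Int × PySem.Dict Int Int → List Int × PySem.Dict Int Int
  | [], st => st
  | i :: rest, (nxt, last) =>
    let v := PySem.List.pyGetD lst i 0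
    plugAltNxt lst INF rest (PySem.List.pySetD nxt i (last.getD v INF), last.insert v i)

-- 'for k, nx in cache.items(): …' with break, carrying (best, evict)
def plugAltChoose (INF : Int) : List (Int × Int) → Int → Option Int → Option Int
  | [], _, evict => evict
  | (k, nx) :: rest, best, evict =>
    if nx ≥ INF then some k
    else if nx > best then plugAltChoose INF rest nx (some k)
    else plugAltChoose INF rest best evict

def plugAltLoop (lst nxt : List Int) (a INF : Int) :
    List Int → Int × PySem.Dict Int Int → Int × PySem.Dict Int Int
  | [], st => st
  | i :: rest, (count, cache) =>
    let v := PySem.List.pyGetD lst i 0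
    let ni := PySem.List.pyGetD nxt i 0
    if cache.contains v then
      plugAltLoop lst nxt a INF rest (count, cache.insert v ni)
    else if (cache.size : Int) < a then
      plugAltLoop lst nxt a INF rest (count, cache.insert v ni)
    else
      let evict := plugAltChoose INF cache.items (-1) none
      plugAltLoop lst nxt a INF rest (count + 1, (cache.erase (evict.getD 0)).insert v ni)

def plug_alt (lst : List Int) (a : Int) (b : Int) : Int :=
  let n : Int := if b > 0 then b else 0
  let built := plugAltNxt lst n (PySem.List.pyRange (n - 1) (-1) (-1))
      (List.replicate n.toNat n, PySem.Dict.empty)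
  (plugAltLoop lst built.1 a n (PySem.List.pyRange 0 n 1) (0, PySem.Dict.empty)).1

-- ===== PRECONDITION & SPEC =====
-- Pre_ excludes exactly the inputs where Python A raises: b > len(lst) (IndexError on
-- lst[i]) and a ≤ 0 < b (lsta.remove(-1) on the first element — ValueError); B raises there too.
def Pre_plug (lst : List Int) (a : Int) (b : Int) : Prop :=
  b ≤ (lst.length : Int) ∧ (0 < b → 0 < a)
instance (lst : List Int) (a : Int) (b : Int) : Decidable (Pre_plug lst a b) := by
  unfold Pre_plug; infer_instance

def pvWitness_plug : List Int × Int × Int := ([1, 2, 3, 1, 2], 2, 5)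

def Spec_plug (lst : List Int) (a : Int) (b : Int) (out : Int) : Prop := out = plug_alt lst a b
instance (lst : List Int) (a : Int) (b : Int) (out : Int) : Decidable (Spec_plug lst a b out) := by
  unfold Spec_plug; infer_instance

-- ===== CLAIM (what is proved, stated in full; the proofs are below) =====
def Claim_equal_plug : Prop := ∀ (lst : List Int) (a : Int) (b : Int),
  Dom_plug lst a b → Pre_plug lst a b → Spec_plug lst a b (plug lst a b)

-- ===== LEMMAS AND PROOFS =====

-- first occurrence of v at an index ≥ i (b if none): the value A's inner rescan computes
-- and the value B's cache stores for a cached element.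
def Ffun (lst : List Int) (b i v : Int) : Int :=
  match plugFound lst v (PySem.List.pyRange i b 1) with
  | some j => j
  | none => b

theorem plugFound_mem {lst : List Int} {k j : Int} :
    ∀ {L : List Int}, plugFound lst k L = some j → j ∈ L := by
  intro L
  induction L with
  | nil => intro h; simp [plugFound] at h
  | cons x rest ih =>
    intro h
    by_cases hx : PySem.List.pyGetD lst x 0 = k
    · simp [plugFound, hx] at h; simp [h]
    · simp [plugFound, hx] at h
      exact List.mem_cons_of_mem _ (ih h)

theorem Ffun_nil {lst : List Int} {b i : Int} (h : b ≤ i) (v : Int) :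
    Ffun lst b i v = b := by
  simp [Ffun, PySem.List.pyRange_one_eq_nil h, plugFound]

theorem Ffun_of_self {lst : List Int} {b i v : Int} (hi : i < b)
    (h : PySem.List.pyGetD lst i 0 = v) : Ffun lst b i v = i := by
  simp [Ffun, PySem.List.pyRange_one_cons hi, plugFound, h]

theorem Ffun_of_ne {lst : List Int} {b i v : Int} (hi : i < b)
    (h : PySem.List.pyGetD lst i 0 ≠ v) : Ffun lst b i v = Ffun lst b (i + 1) v := by
  simp [Ffun, PySem.List.pyRange_one_cons hi, plugFound, h]

theorem Ffun_spec (lst : List Int) (b i v : Int) :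
    (plugFound lst v (PySem.List.pyRange i b 1) = none ∧ Ffun lst b i v = b) ∨
    (∃ j, plugFound lst v (PySem.List.pyRange i b 1) = some j ∧ Ffun lst b i v = j ∧
      i ≤ j ∧ j < b) := by
  cases hf : plugFound lst v (PySem.List.pyRange i b 1) with
  | none => left; exact ⟨rfl, by simp [Ffun, hf]⟩
  | some j =>
    right
    have hj := plugFound_mem hf
    rw [PySem.List.mem_pyRange_one] at hj
    exact ⟨j, rfl, by simp [Ffun, hf], hj.1, hj.2⟩

theorem choose_eq (lst : List Int) (b i : Int) :
    ∀ (ks : List Int) (idx r0 : Int),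
      plugAltChoose b (ks.map fun k => (k, Ffun lst b (i + 1) k)) idx (some r0) =
        some (plugScan lst i b ks idx r0) := by
  intro ks
  induction ks with
  | nil => intro idx r0; simp [plugAltChoose, plugScan]
  | cons k rest ih =>
    intro idx r0
    rcases Ffun_spec lst b (i + 1) k with ⟨hf, hF⟩ | ⟨j, hf, hF, hj1, hj2⟩
    · simp [plugAltChoose, plugScan, hf, hF]
    · have hnge : ¬ b ≤ j := by omega
      by_cases hidx : j > idx
      · simp [plugAltChoose, plugScan, hf, hF, hnge, hidx, ih]
      · simp [plugAltChoose, plugScan, hf, hF, hnge, hidx, ih]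

theorem choose_head (lst : List Int) (b i : Int) (hi : 0 ≤ i) (k : Int) (rest : List Int) :
    plugAltChoose b ((k :: rest).map fun k => (k, Ffun lst b (i + 1) k)) (-1) none =
      some (plugScan lst i b (k :: rest) (-1) (-1)) := by
  rcases Ffun_spec lst b (i + 1) k with ⟨hf, hF⟩ | ⟨j, hf, hF, hj1, hj2⟩
  · simp [plugAltChoose, plugScan, hf, hF]
  · have hnge : ¬ b ≤ j := by omega
    have hgt : j > -1 := by omega
    simp [plugAltChoose, plugScan, hf, hF, hnge, hgt, choose_eq]

theorem scan_mem (lst : List Int) (b i : Int) :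
    ∀ (ks : List Int) (idx r : Int),
      plugScan lst i b ks idx r = r ∨ plugScan lst i b ks idx r ∈ ks := by
  intro ks
  induction ks with
  | nil => intro idx r; left; simp [plugScan]
  | cons k rest ih =>
    intro idx r
    simp only [plugScan]
    cases hf : plugFound lst k (PySem.List.pyRange (i + 1) b 1) with
    | none => right; simp
    | some j =>
      by_cases hidx : j > idx
      · simp only [hidx, if_pos]
        rcases ih j k with h | h
        · right; simp [h]
        · right; exact List.mem_cons_of_mem _ h
      · simp only [hidx, if_false]
        rcases ih idx r with h | h
        · left; exact h
        · right; exact List.mem_cons_of_mem _ h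

theorem scan_mem_head (lst : List Int) (b i : Int) (hi : 0 ≤ i) (k : Int) (rest : List Int) :
    plugScan lst i b (k :: rest) (-1) (-1) ∈ k :: rest := by
  simp only [plugScan]
  cases hf : plugFound lst k (PySem.List.pyRange (i + 1) b 1) with
  | none => simp
  | some j =>
    have hj := plugFound_mem hf
    rw [PySem.List.mem_pyRange_one] at hj
    have hgt : j > -1 := by omega
    simp only [hgt, if_pos]
    rcases scan_mem lst b i rest j k with h | h
    · simp [h]
    · exact List.mem_cons_of_mem _ h

theorem build_loop (lst : List Int) (b : Int) :
    ∀ (t : Nat), (t : Int) ≤ b → ∀ (nxt0 : List Int) (last : PySem.Dict Int Int),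
    nxt0.length = b.toNat →
    (∀ v, last.getD v b = Ffun lst b t v) →
    (∀ j : Nat, t ≤ j → (j : Int) < b →
      PySem.List.pyGetD nxt0 (j : Int) 0 = Ffun lst b ((j : Int) + 1) (PySem.List.pyGetD lst (j : Int) 0)) →
    (plugAltNxt lst b (PySem.List.pyRange ((t : Int) - 1) (-1) (-1)) (nxt0, last)).1.length = b.toNat ∧
    (∀ j : Nat, (j : Int) < b →
      PySem.List.pyGetD (plugAltNxt lst b (PySem.List.pyRange ((t : Int) - 1) (-1) (-1)) (nxt0, last)).1 (j : Int) 0 =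
        Ffun lst b ((j : Int) + 1) (PySem.List.pyGetD lst (j : Int) 0)) := by
  intro t
  induction t with
  | zero =>
    intro _ nxt0 last hlen _ hdone
    rw [PySem.List.pyRange_neg_one_eq_nil (by omega)]
    exact ⟨hlen, fun j hj => hdone j (Nat.zero_le j) hj⟩
  | succ t ih =>
    intro ht nxt0 last hlen hlast hdone
    have hcons : PySem.List.pyRange ((t : Int) + 1 - 1) (-1) (-1) =
        (t : Int) :: PySem.List.pyRange ((t : Int) - 1) (-1) (-1) := by
      have : ((t : Int) + 1 - 1) = (t : Int) := by omega
      rw [this, PySem.List.pyRange_neg_one_cons (by omega)]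
    have htb : (t : Int) < b := by push_cast at ht ⊢; omega
    have hstep : plugAltNxt lst b (PySem.List.pyRange ((t : Int) + 1 - 1) (-1) (-1)) (nxt0, last) =
        plugAltNxt lst b (PySem.List.pyRange ((t : Int) - 1) (-1) (-1))
          (PySem.List.pySetD nxt0 (t : Int) (last.getD (PySem.List.pyGetD lst (t : Int) 0) b),
           last.insert (PySem.List.pyGetD lst (t : Int) 0) (t : Int)) := by
      rw [hcons]; rfl
    have hcast : ((t : Nat) : Int) + 1 - 1 = (((t + 1 : Nat) : Int)) - 1 := by push_cast; ring
    rw [← hcast]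
    rw [hstep]
    have hlen' : (PySem.List.pySetD nxt0 (t : Int) (last.getD (PySem.List.pyGetD lst (t : Int) 0) b)).length = b.toNat := by
      rw [PySem.List.pySetD_natCast]; simp [hlen]
    refine ih (by omega) _ _ hlen' ?_ ?_
    · intro v
      by_cases hv : v = PySem.List.pyGetD lst (t : Int) 0
      · subst hv
        rw [PySem.Dict.getD_insert]
        simp only [if_pos rfl]
        exact (Ffun_of_self htb rfl).symm
      · rw [PySem.Dict.getD_insert, if_neg hv, hlast v]
        have := Ffun_of_ne htb (v := v) (fun h => hv (h.symm ▸ rfl))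
        push_cast
        omega
    · intro j hj hjb
      by_cases hjt : j = t
      · subst hjt
        have hjl : j < nxt0.length := by omega
        have : PySem.List.pyGetD (PySem.List.pySetD nxt0 (j : Int) (last.getD (PySem.List.pyGetD lst (j : Int) 0) b)) (j : Int) 0 =
            last.getD (PySem.List.pyGetD lst (j : Int) 0) b := by
          simp [PySem.List.pySetD_natCast, PySem.List.pyGetD_natCast,
            List.getD_eq_getElem?_getD, hjl]
        rw [this, hlast]
        push_cast
        rfl
      · have hne : t ≠ j := fun h => hjt h.symm
        have : PySem.List.pyGetD (PySem.List.pySetD nxt0 (t : Int) (last.getD (PySem.List.pyGetD lst (t : Int) 0) b)) (j : Int) 0 =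
            PySem.List.pyGetD nxt0 (j : Int) 0 := by
          simp [PySem.List.pySetD_natCast, PySem.List.pyGetD_natCast,
            List.getD_eq_getElem?_getD, hne]
        rw [this]
        exact hdone j (by omega) hjb

theorem loop_eq (lst nxt : List Int) (a b : Int) (ha : 0 < a)
    (hnxt : ∀ j : Int, 0 ≤ j → j < b →
      PySem.List.pyGetD nxt j 0 = Ffun lst b (j + 1) (PySem.List.pyGetD lst j 0)) :
    ∀ (m : Nat) (i : Int), 0 ≤ i → i ≤ b → (b - i).toNat = m →
    ∀ (count : Int) (lsta : List Int) (cache : PySem.Dict Int Int),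
      lsta.Nodup →
      cache.items = lsta.map (fun k => (k, Ffun lst b i k)) →
      (plugLoop lst a b (PySem.List.pyRange i b 1) (count, lsta)).1 =
        (plugAltLoop lst nxt a b (PySem.List.pyRange i b 1) (count, cache)).1 := by
  intro m
  induction m with
  | zero =>
    intro i h0 hib hm count lsta cache hnd hitems
    have hbi : i = b := by omega
    subst hbi
    rw [PySem.List.pyRange_one_eq_nil le_rfl]
    simp [plugLoop, plugAltLoop]
  | succ m ih =>
    intro i h0 hib hm count lsta cache hnd hitems
    have hib' : i < b := by omega
    rw [PySem.List.pyRange_one_cons hib']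
    simp only [plugLoop, plugAltLoop]
    have hni : PySem.List.pyGetD nxt i 0 = Ffun lst b (i + 1) (PySem.List.pyGetD lst i 0) :=
      hnxt i h0 hib'
    have hcont : cache.contains (PySem.List.pyGetD lst i 0) = true ↔
        PySem.List.pyGetD lst i 0 ∈ lsta := by
      simp [PySem.Dict.contains, hitems, List.any_map, Function.comp, List.any_eq_true]
    by_cases hmem : PySem.List.pyGetD lst i 0 ∈ lsta
    · rw [if_pos hmem, if_pos (hcont.mpr hmem)]
      refine ih (i + 1) (by omega) (by omega) (by omega) count lsta _ hnd ?_
      rw [PySem.Dict.items_insert, if_pos (hcont.mpr hmem), hitems, List.map_map]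
      refine List.map_congr_left ?_
      intro k hk
      by_cases hkv : k = PySem.List.pyGetD lst i 0
      · subst hkv
        simp [hni]
      · have : (PySem.List.pyGetD lst i 0 : Int) ≠ k := fun h => hkv h.symm
        simp [Function.comp, hkv, Ffun_of_ne hib' this]
    · rw [if_neg hmem, if_neg (fun h => hmem (hcont.mp h))]
      have hsize : (cache.size : Int) = (lsta.length : Int) := by
        simp [PySem.Dict.size, hitems]
      have hitems' : cache.items = lsta.map (fun k => (k, Ffun lst b (i + 1) k)) := by
        rw [hitems]
        refine List.map_congr_left ?_
        intro k hk
        have hkv : (PySem.List.pyGetD lst i 0 : Int) ≠ k := fun h => hmem (h ▸ hk)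
        rw [Ffun_of_ne hib' hkv]
      have hnotc : cache.contains (PySem.List.pyGetD lst i 0) = false :=
        Bool.eq_false_iff.mpr (fun h => hmem (hcont.mp h))
      by_cases hfull : (lsta.length : Int) < a
      · rw [if_pos hfull, if_pos (by rw [hsize]; exact hfull)]
        refine ih (i + 1) (by omega) (by omega) (by omega) count _ _ ?_ ?_
        · simp [List.nodup_append, hnd, hmem]
          intro x hx h
          exact hmem (h ▸ hx)
        · rw [PySem.Dict.items_insert, hnotc]
          simp only [Bool.false_eq_true, if_false]
          rw [hitems', List.map_append]
          simp [hni]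
      · rw [if_neg hfull, if_neg (by rw [hsize]; exact hfull)]
        obtain ⟨k0, ks, rfl⟩ : ∃ k0 ks, lsta = k0 :: ks := by
          cases lsta with
          | nil => simp at hfull; omega
          | cons k0 ks => exact ⟨k0, ks, rfl⟩
        have hchoose : plugAltChoose b cache.items (-1) none =
            some (plugScan lst i b (k0 :: ks) (-1) (-1)) := by
          rw [hitems']
          exact choose_head lst b i h0 k0 ks
        rw [hchoose]
        have hrmem : plugScan lst i b (k0 :: ks) (-1) (-1) ∈ k0 :: ks :=
          scan_mem_head lst b i h0 k0 ks
        have hrem : PySem.List.remove? (k0 :: ks) (plugScan lst i b (k0 :: ks) (-1) (-1)) =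
            some ((k0 :: ks).erase (plugScan lst i b (k0 :: ks) (-1) (-1))) :=
          PySem.List.remove?_eq_some_erase _ _ hrmem
        rw [hrem]
        simp only [Option.getD_some]
        refine ih (i + 1) (by omega) (by omega) (by omega) (count + 1) _ _ ?_ ?_
        · simp [List.nodup_append, hnd.erase _]
          intro x hx h
          exact hmem (h ▸ List.mem_of_mem_erase hx)
        · have herase : ((cache.erase (plugScan lst i b (k0 :: ks) (-1) (-1)))).items =
              ((k0 :: ks).erase (plugScan lst i b (k0 :: ks) (-1) (-1))).map
                (fun k => (k, Ffun lst b (i + 1) k)) := by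
            simp only [PySem.Dict.erase, hitems']
            rw [List.filter_map]
            congr 1
            rw [List.Nodup.erase_eq_filter hnd]
            apply List.filter_congr
            intro x hx
            simp [Function.comp, bne]
          have hnotc2 : (cache.erase (plugScan lst i b (k0 :: ks) (-1) (-1))).contains
              (PySem.List.pyGetD lst i 0) = false := by
            refine Bool.eq_false_iff.mpr (fun h => ?_)
            simp only [PySem.Dict.contains, herase, List.any_map, List.any_eq_true,
              Function.comp] at h
            obtain ⟨x, hx, hxe⟩ := h
            have hxeq : x = PySem.List.pyGetD lst i 0 := by simpa using hxe
            exact hmem (hxeq ▸ List.mem_of_mem_erase hx)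
          rw [PySem.Dict.items_insert, hnotc2]
          simp only [Bool.false_eq_true, if_false]
          rw [herase, List.map_append]
          simp [hni]

-- ===== VERDICT (by name: the statement is the Claim_ definition above) =====
theorem plug_spec : Claim_equal_plug := by
  intro lst a b _ hpre
  unfold Spec_plug
  by_cases hb : 0 < b
  · have ha : 0 < a := hpre.2 hb
    have hbn : ((b.toNat : Int)) = b := Int.toNat_of_nonneg (le_of_lt hb)
    have hplugalt : plug_alt lst a b =
        (plugAltLoop lst
          (plugAltNxt lst b (PySem.List.pyRange (b - 1) (-1) (-1))
            (List.replicate b.toNat b, PySem.Dict.empty)).1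
          a b (PySem.List.pyRange 0 b 1) (0, PySem.Dict.empty)).1 := by
      simp only [plug_alt, gt_iff_lt, if_pos hb]
    obtain ⟨hL, hN⟩ := build_loop lst b b.toNat (by omega)
      (List.replicate b.toNat b) PySem.Dict.empty (by simp)
      (fun v => by
        rw [PySem.Dict.getD_empty]
        exact (Ffun_nil (by omega) v).symm)
      (fun j hj hjb => by omega)
    rw [hbn] at hN
    have hnxtInt : ∀ j : Int, 0 ≤ j → j < b →
        PySem.List.pyGetD
          (plugAltNxt lst b (PySem.List.pyRange (b - 1) (-1) (-1))
            (List.replicate b.toNat b, PySem.Dict.empty)).1 j 0 =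
          Ffun lst b (j + 1) (PySem.List.pyGetD lst j 0) := by
      intro j hj0 hjb
      have := hN j.toNat (by omega)
      rwa [Int.toNat_of_nonneg hj0] at this
    rw [hplugalt]
    exact loop_eq lst _ a b ha hnxtInt (b - 0).toNat 0 le_rfl (le_of_lt hb) rfl
      0 [] PySem.Dict.empty (by simp) (by simp [PySem.Dict.empty])
  · have h1 : PySem.List.pyRange 0 b 1 = [] := PySem.List.pyRange_one_eq_nil (by omega)
    have h2 : ¬ (b > 0) := by omega
    simp [plug, plug_alt, h1, h2, plugLoop, plugAltLoop,
      PySem.List.pyRange_neg_one_eq_nil, PySem.List.pyRange_one_eq_nil]
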